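-- pv_equiv track=rewrite | github.com/jeffbrianho/python_110 | py119_written_practice/work_space.py | sum_until_threshold
-- ===== SOURCE A (Python) =====
-- def sum_until_threshold(dictionary, threshold):
--     running_sum = 0
--     final_sum = 0
--
--
--     for value in dictionary.values():
--         running_sum += value
--         if running_sum < threshold:
--             final_sum = running_sum
--
--     return final_sum
-- ===== SOURCE B (Python) =====
-- def sum_until_threshold(dictionary, threshold):
--     # Scan from the right: start at the grand total and peel values off the
--     # end; the first running total found below threshold is exactly the last
--     # qualifying prefix sum, so we can return early.
--     values = list(dictionary.values())
--     s = sum(values)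
--     for v in reversed(values):
--         if s < threshold:
--             return s
--         s -= v
--     return 0
-- ===== Notes on version B (the rewrite author's own statement) =====
-- stated objective: alternative
-- what changed: Replaced A's forward loop (which tracks running_sum and overwrites final_sum at each qualifying prefix) with a backward scan: compute the grand total once, then walk the values in reverse subtracting each, returning immediately at the first prefix sum below threshold (the last qualifying one), with early exit.
import Mathlib
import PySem

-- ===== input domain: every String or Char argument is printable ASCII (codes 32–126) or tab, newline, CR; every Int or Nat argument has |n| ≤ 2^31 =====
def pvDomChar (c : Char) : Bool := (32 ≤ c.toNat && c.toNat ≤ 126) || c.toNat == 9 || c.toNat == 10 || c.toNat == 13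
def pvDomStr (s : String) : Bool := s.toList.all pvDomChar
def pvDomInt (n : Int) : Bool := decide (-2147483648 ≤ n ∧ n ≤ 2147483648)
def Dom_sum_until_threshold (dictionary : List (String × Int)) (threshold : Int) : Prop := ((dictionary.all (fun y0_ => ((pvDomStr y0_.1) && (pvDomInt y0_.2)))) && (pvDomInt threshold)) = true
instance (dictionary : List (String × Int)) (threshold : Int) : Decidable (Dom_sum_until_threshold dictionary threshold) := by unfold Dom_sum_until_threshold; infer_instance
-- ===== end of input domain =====

-- B replaces A's forward loop with a backward scan from the grand total that returns at the first prefix sum below threshold (early exit); alternative decomposition, same cost.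


-- ===== PORT A =====
-- Forward loop over dictionary.values() carrying (running_sum, final_sum).
def sum_until_threshold (dictionary : List (String × Int)) (threshold : Int) : Int :=
  ((dictionary.map Prod.snd).foldl
    (fun (st : Int × Int) value =>
      let running_sum := st.1 + value
      (running_sum, if running_sum < threshold then running_sum else st.2))
    (0, 0)).2

-- ===== PORT B =====
-- 'for v in reversed(values): if s < threshold: return s; s -= v' then 'return 0'
def pvBackScan (threshold : Int) : List Int → Int → Int
  | [], _ => 0
  | v :: rest, s => if s < threshold then s else pvBackScan threshold rest (s - v)

def sum_until_threshold_alt (dictionary : List (String × Int)) (threshold : Int) : Int :=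
  let values := dictionary.map Prod.snd
  pvBackScan threshold values.reverse values.sum

-- ===== PRECONDITION & SPEC =====
def Spec_sum_until_threshold (dictionary : List (String × Int)) (threshold : Int) (out : Int) : Prop := out = sum_until_threshold_alt dictionary threshold
instance (dictionary : List (String × Int)) (threshold : Int) (out : Int) : Decidable (Spec_sum_until_threshold dictionary threshold out) := by unfold Spec_sum_until_threshold; infer_instance

-- ===== CLAIM (what is proved, stated in full; the proofs are below) =====
def Claim_equal_sum_until_threshold : Prop := ∀ (dictionary : List (String × Int)) (threshold : Int), Dom_sum_until_threshold dictionary threshold → Spec_sum_until_threshold dictionary threshold (sum_until_threshold dictionary threshold)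

-- ===== LEMMAS AND PROOFS =====
-- Prefix sums of vs starting from acc (proof-side characterisation only).
def pvAccum (vs : List Int) (acc : Int) : List Int :=
  match vs with
  | [] => []
  | v :: rest => (acc + v) :: pvAccum rest (acc + v)

-- A's loop returns the last prefix sum below threshold (default fs).
theorem pv_loop_eq (t : Int) (vs : List Int) (acc fs : Int) :
    (vs.foldl
      (fun (st : Int × Int) value =>
        let running_sum := st.1 + value
        (running_sum, if running_sum < t then running_sum else st.2))
      (acc, fs)).2
    = ((pvAccum vs acc).filter (fun s => s < t)).getLastD fs := by
  induction vs generalizing acc fs with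
  | nil => simp [pvAccum]
  | cons v rest ih =>
    simp only [List.foldl_cons, pvAccum, List.filter_cons]
    by_cases h : acc + v < t
    · simp only [h, if_true, decide_true, List.getLastD_cons]
      exact ih (acc + v) (acc + v)
    · simp only [h, if_false, decide_false, Bool.false_eq_true]
      exact ih (acc + v) fs

theorem pvAccum_append (ys : List Int) (v acc : Int) :
    pvAccum (ys ++ [v]) acc = pvAccum ys acc ++ [acc + ys.sum + v] := by
  induction ys generalizing acc with
  | nil => simp [pvAccum]
  | cons y rest ih => simp [pvAccum, ih (acc + y)]; ring_nf

-- B's backward scan also returns the last prefix sum below threshold (default 0).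
theorem pv_back_eq (t : Int) (vs : List Int) (acc : Int) :
    pvBackScan t vs.reverse (acc + vs.sum) = ((pvAccum vs acc).filter (fun s => s < t)).getLastD 0 := by
  induction vs using List.reverseRecOn generalizing acc with
  | nil => simp [pvBackScan, pvAccum]
  | append_singleton ys v ih =>
    rw [pvAccum_append, List.filter_append, List.reverse_append]
    simp only [List.reverse_singleton, List.singleton_append, pvBackScan, List.filter_cons,
      List.filter_nil]
    by_cases h : acc + ys.sum + v < t
    · have : acc + (ys ++ [v]).sum = acc + ys.sum + v := by simp [List.sum_append]; ring
      rw [this]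
      simp [h]
    · simp only [h, decide_false, Bool.false_eq_true, if_false]
      have h2 : acc + (ys ++ [v]).sum = acc + ys.sum + v := by simp [List.sum_append]; ring
      rw [h2]
      rw [if_neg h]
      have h3 : acc + ys.sum + v - v = acc + ys.sum := by ring
      rw [h3, ih acc]
      simp

-- ===== VERDICT (by name: the statement is the Claim_ definition above) =====
theorem sum_until_threshold_spec : Claim_equal_sum_until_threshold := by
  intro dictionary threshold _
  unfold Spec_sum_until_threshold sum_until_threshold sum_until_threshold_alt
  rw [pv_loop_eq threshold (dictionary.map Prod.snd) 0 0]
  have := pv_back_eq threshold (dictionary.map Prod.snd) 0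
  simpa using this.symm
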